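-- pv_equiv track=rewrite | github.com/martinsferco/Othello | Python/functions.py | jugadasMaximizadoras
-- ===== SOURCE A (Python) =====
-- def jugadasMaximizadoras(posicionesPosibles):
--
--     """
--     jugadasMaximizadoras :: dict((int,int):set((int,int))) -> list((int,int))
--
--     Dado el diccionario de todas las jugadas posibles, con las fichas que afectan, nos devuelve
--     una lista de tuplas que representa todas las jugadas que generan el mayor numero de cambios.
--     """
--
--     listaJugadasMaximizadoras = []
--
--     for coordenada in posicionesPosibles:
--
--         cantidadFichasVolteadas = len(posicionesPosibles[coordenada])
--
--         # Si esta vacio consideramos el primer elemento como maximizaodr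
--         if listaJugadasMaximizadoras == []:
--
--             listaJugadasMaximizadoras = [coordenada]
--             maximaCantidadFichasVolteadas = cantidadFichasVolteadas
--
--         # Si tiene la misma cantidad de fichas volteadas
--         elif cantidadFichasVolteadas == maximaCantidadFichasVolteadas:
--
--             listaJugadasMaximizadoras.append(coordenada)
--
--         # Si encontramos una nueva jugada maximizadora
--         elif cantidadFichasVolteadas > maximaCantidadFichasVolteadas:
--
--             listaJugadasMaximizadoras = [coordenada]
--             maximaCantidadFichasVolteadas = cantidadFichasVolteadas
--
--     return listaJugadasMaximizadoras
-- ===== SOURCE B (Python) =====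
-- def jugadasMaximizadoras(posicionesPosibles):
--     # Two-pass: compute the global maximum of flipped pieces, then keep the
--     # moves attaining it (dict iteration order is preserved by the filter).
--     if not posicionesPosibles:
--         return []
--     maxima = max(len(fichas) for fichas in posicionesPosibles.values())
--     return [jugada for jugada in posicionesPosibles
--             if len(posicionesPosibles[jugada]) == maxima]
-- ===== Notes on version B (the rewrite author's own statement) =====
-- stated objective: simpler
-- what changed: Replaces A's single pass with a running maximum, conditional list rebuilding and appends by a two-pass decomposition: compute the global maximum of the value sizes, then keep the keys attaining it with one comprehension.
import Mathlib
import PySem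

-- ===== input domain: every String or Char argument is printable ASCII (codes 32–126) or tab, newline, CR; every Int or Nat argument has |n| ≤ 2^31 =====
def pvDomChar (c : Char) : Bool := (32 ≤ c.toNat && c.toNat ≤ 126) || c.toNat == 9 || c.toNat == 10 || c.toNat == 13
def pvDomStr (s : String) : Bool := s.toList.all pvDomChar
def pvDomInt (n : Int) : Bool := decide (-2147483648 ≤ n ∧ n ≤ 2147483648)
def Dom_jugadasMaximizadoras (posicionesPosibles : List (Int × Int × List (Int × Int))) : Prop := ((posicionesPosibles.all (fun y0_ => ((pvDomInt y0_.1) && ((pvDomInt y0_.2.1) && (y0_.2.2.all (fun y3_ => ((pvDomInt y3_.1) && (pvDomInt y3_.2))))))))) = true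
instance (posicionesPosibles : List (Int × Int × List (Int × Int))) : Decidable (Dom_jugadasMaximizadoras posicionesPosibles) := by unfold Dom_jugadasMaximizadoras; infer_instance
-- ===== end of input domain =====

-- B replaces A's single pass (running maximum + conditional list rebuilding) by a
-- two-pass max-then-filter decomposition; objective: simpler.


-- ===== PORT A =====
-- one step of A's loop body, on state (listaJugadasMaximizadoras, maximaCantidad)
def pvStepA (d : PySem.Dict (Int × Int) (List (Int × Int)))
    (acc : List (Int × Int) × Int) (coordenada : Int × Int) : List (Int × Int) × Int :=
  let cantidadFichasVolteadas : Int := (d.getD coordenada []).length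
  if acc.1 = ([] : List (Int × Int)) then ([coordenada], cantidadFichasVolteadas)
  else if cantidadFichasVolteadas = acc.2 then (acc.1 ++ [coordenada], acc.2)
  else if cantidadFichasVolteadas > acc.2 then ([coordenada], cantidadFichasVolteadas)
  else acc

def jugadasMaximizadoras (posicionesPosibles : List (Int × Int × List (Int × Int))) : List (Int × Int) :=
  let d : PySem.Dict (Int × Int) (List (Int × Int)) :=
    PySem.Dict.mk (posicionesPosibles.map (fun e => ((e.1, e.2.1), e.2.2)))
  (d.keys.foldl (pvStepA d) (([] : List (Int × Int)), (0 : Int))).1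

-- ===== PORT B =====
def jugadasMaximizadoras_alt (posicionesPosibles : List (Int × Int × List (Int × Int))) : List (Int × Int) :=
  let d : PySem.Dict (Int × Int) (List (Int × Int)) :=
    PySem.Dict.mk (posicionesPosibles.map (fun e => ((e.1, e.2.1), e.2.2)))
  if posicionesPosibles = [] then []
  else
    match PySem.List.max? (d.values.map (fun fichas => (fichas.length : Int))) (fun x => x) with
    | none => []
    | some maxima => d.keys.filter (fun jugada => ((d.getD jugada []).length : Int) = maxima)

-- ===== PRECONDITION & SPEC =====
-- Pre_ only rules out association lists with duplicate keys, which represent no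
-- Python dict (dict keys are unique): every actual input of A satisfies it.
def Pre_jugadasMaximizadoras (posicionesPosibles : List (Int × Int × List (Int × Int))) : Prop :=
  (posicionesPosibles.map (fun e => (e.1, e.2.1))).Nodup
instance (posicionesPosibles : List (Int × Int × List (Int × Int))) : Decidable (Pre_jugadasMaximizadoras posicionesPosibles) := by unfold Pre_jugadasMaximizadoras; infer_instance

def pvWitness_jugadasMaximizadoras : (List (Int × Int × List (Int × Int))) :=
  [(0, 0, [(1, 1)]), (2, 3, [(1, 1), (1, 2)]), (4, 4, [(0, 1), (0, 2)])]

def Spec_jugadasMaximizadoras (posicionesPosibles : List (Int × Int × List (Int × Int))) (out : List (Int × Int)) : Prop := out = jugadasMaximizadoras_alt posicionesPosibles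
instance (posicionesPosibles : List (Int × Int × List (Int × Int))) (out : List (Int × Int)) : Decidable (Spec_jugadasMaximizadoras posicionesPosibles out) := by unfold Spec_jugadasMaximizadoras; infer_instance

-- ===== CLAIM (what is proved, stated in full; the proofs are below) =====
def Claim_equal_jugadasMaximizadoras : Prop := ∀ (posicionesPosibles : List (Int × Int × List (Int × Int))), Dom_jugadasMaximizadoras posicionesPosibles → Pre_jugadasMaximizadoras posicionesPosibles → Spec_jugadasMaximizadoras posicionesPosibles (jugadasMaximizadoras posicionesPosibles)

-- ===== LEMMAS AND PROOFS =====

-- running maximum of f over a nonempty list (value of Python's max on ks.map f)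
def pvMaxOf (f : (Int × Int) → Int) : List (Int × Int) → Int
  | [] => 0
  | k :: t => t.foldl (fun a x => max a (f x)) (f k)

theorem pvMaxOf_append (f : (Int × Int) → Int) (p : List (Int × Int)) (hp : p ≠ [])
    (k : Int × Int) : pvMaxOf f (p ++ [k]) = max (pvMaxOf f p) (f k) := by
  cases p with
  | nil => exact absurd rfl hp
  | cons a t => simp [pvMaxOf, List.foldl_append]

theorem le_pvMaxOf (f : (Int × Int) → Int) (p : List (Int × Int)) :
    ∀ x ∈ p, f x ≤ pvMaxOf f p := by
  induction p using List.reverseRecOn with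
  | nil => intro x hx; simp at hx
  | append_singleton t k ih =>
    intro x hx
    cases t with
    | nil => simp at hx; simp [hx, pvMaxOf]
    | cons a s =>
      rw [pvMaxOf_append f (a :: s) (by simp) k]
      rcases List.mem_append.1 hx with h | h
      · exact le_trans (ih x h) (le_max_left _ _)
      · simp at h; simp [h]

theorem max?_eq_pvMaxOf (f : (Int × Int) → Int) (k : Int × Int) (t : List (Int × Int)) :
    PySem.List.max? ((k :: t).map f) (fun x => x) = some (pvMaxOf f (k :: t)) := by
  rw [List.map_cons, PySem.List.max?_id_cons, List.foldl_map]
  rfl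

-- the invariant of A's loop: after a nonempty prefix, the state is
-- (keys of the prefix attaining the prefix maximum, that maximum)
theorem foldA_inv (d : PySem.Dict (Int × Int) (List (Int × Int)))
    (f : (Int × Int) → Int) (hf : ∀ k, f k = ((d.getD k []).length : Int))
    (ks : List (Int × Int)) (hne : ks ≠ []) :
    ks.foldl (pvStepA d) (([] : List (Int × Int)), (0 : Int))
      = (ks.filter (fun k => f k = pvMaxOf f ks), pvMaxOf f ks)
    ∧ ks.filter (fun k => f k = pvMaxOf f ks) ≠ [] := by
  induction ks using List.reverseRecOn with
  | nil => exact absurd rfl hne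
  | append_singleton p k ih =>
    cases p with
    | nil =>
      constructor
      · simp [pvStepA, pvMaxOf, ← hf k]
      · simp [pvMaxOf]
    | cons a t =>
      obtain ⟨hfold, hnonnil⟩ := ih (by simp)
      set P : List (Int × Int) := a :: t with hP
      have hPne : P ≠ [] := by simp [hP]
      rw [List.foldl_append, hfold]
      rw [pvMaxOf_append f P hPne k]
      by_cases h1 : f k = pvMaxOf f P
      · -- equal: append k
        have hmax : max (pvMaxOf f P) (f k) = pvMaxOf f P := by omega
        rw [hmax, List.filter_append]
        constructor
        · simp [pvStepA, ← hf k, h1, hnonnil]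
        · simp [List.filter, h1]
      · by_cases h2 : f k > pvMaxOf f P
        · -- new maximum: restart with [k]
          have hmax : max (pvMaxOf f P) (f k) = f k := by omega
          have hnone : P.filter (fun x => decide (f x = f k)) = [] := by
            rw [List.filter_eq_nil_iff]
            intro x hx
            have := le_pvMaxOf f P x hx
            simp only [decide_eq_true_eq]
            omega
          rw [hmax, List.filter_append, hnone]
          constructor
          · simp [pvStepA, ← hf k, h1, h2, hnonnil]
          · simp [List.filter]
        · -- smaller: unchanged
          have hmax : max (pvMaxOf f P) (f k) = pvMaxOf f P := by omega
          have hk : ¬ (f k = pvMaxOf f P) := h1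
          rw [hmax, List.filter_append]
          constructor
          · simp [pvStepA, ← hf k, h1, h2, hnonnil]
          · simp only [List.filter, hk]
            simpa using hnonnil

-- ===== VERDICT (by name: the statement is the Claim_ definition above) =====
theorem jugadasMaximizadoras_spec : Claim_equal_jugadasMaximizadoras := by
  intro l _hdom hpre
  unfold Spec_jugadasMaximizadoras jugadasMaximizadoras jugadasMaximizadoras_alt
  set d : PySem.Dict (Int × Int) (List (Int × Int)) :=
    PySem.Dict.mk (l.map (fun e => ((e.1, e.2.1), e.2.2))) with hd
  have hkeys : d.keys = l.map (fun e => (e.1, e.2.1)) := by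
    simp [hd, PySem.Dict.keys, List.map_map, Function.comp]
  have hnd : d.keys.Nodup := by rw [hkeys]; exact hpre
  cases hl : l with
  | nil => subst hl; simp [hd, PySem.Dict.keys]
  | cons e es =>
    have hne : l ≠ [] := by simp [hl]
    have hkne : d.keys ≠ [] := by rw [hkeys, hl]; simp
    rw [← hl]
    simp only [hne, ite_false]
    set f : (Int × Int) → Int := fun k => ((d.getD k []).length : Int) with hfdef
    have hvals : d.values.map (fun fichas => (fichas.length : Int)) = d.keys.map f := by
      rw [PySem.Dict.values_eq_map_keys d hnd []]
      simp [List.map_map, Function.comp, hfdef]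
    obtain ⟨kk, kt, hkk⟩ : ∃ kk kt, d.keys = kk :: kt := by
      cases hc : d.keys with
      | nil => exact absurd hc hkne
      | cons a b => exact ⟨a, b, rfl⟩
    rw [hvals, hkk, max?_eq_pvMaxOf f kk kt, ← hkk]
    obtain ⟨hfold, _⟩ := foldA_inv d f (fun k => rfl) d.keys hkne
    rw [hfold]
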